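-- pv_equiv track=rewrite | github.com/gss1147/Malibu-DuGan | gui.py | _create_contextual_prompt
-- ===== SOURCE A (Python) =====
-- def _create_contextual_prompt(user_input, ai_response):
--     """Create contextual prompt for image generation"""
--     base_prompt = "Malibu DuGan, photorealistic, 8k, nsfw, ultra thin silk panties"
--
--     # Add contextual elements
--     if any(word in user_input.lower() for word in ['tease', 'teasing']):
--         base_prompt += ", teasing pose, seductive expression, playing with silk panties"
--     elif any(word in user_input.lower() for word in ['dance', 'lap']):
--         base_prompt += ", lap dance pose, sensual movement, thigh high stockings"
--     elif any(word in user_input.lower() for word in ['spiritual', 'meditation']):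
--         base_prompt += ", spiritual pose, serene expression, divine lighting"
--     elif any(word in user_input.lower() for word in ['thigh', 'legs']):
--         base_prompt += ", thigh focus, legs showing, silk panty visible"
--     elif any(word in user_input.lower() for word in ['guy', 'husband']):
--         base_prompt += ", loyal expression, showing 'Property Of Guy DuGan II' tattoo"
--     elif any(word in user_input.lower() for word in ['tattoo', 'ink']):
--         base_prompt += ", showing tattoos, lower back tattoo visible"
--
--     return base_prompt
-- ===== SOURCE B (Python) =====
-- _KEYWORD_RULE = {
--     'tease': 0, 'teasing': 0,
--     'dance': 1, 'lap': 1,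
--     'spiritual': 2, 'meditation': 2,
--     'thigh': 3, 'legs': 3,
--     'guy': 4, 'husband': 4,
--     'tattoo': 5, 'ink': 5,
-- }
--
-- _SUFFIXES = [
--     ", teasing pose, seductive expression, playing with silk panties",
--     ", lap dance pose, sensual movement, thigh high stockings",
--     ", spiritual pose, serene expression, divine lighting",
--     ", thigh focus, legs showing, silk panty visible",
--     ", loyal expression, showing 'Property Of Guy DuGan II' tattoo",
--     ", showing tattoos, lower back tattoo visible",
-- ]
--
-- def _create_contextual_prompt(user_input, ai_response):
--     base_prompt = "Malibu DuGan, photorealistic, 8k, nsfw, ultra thin silk panties"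
--     lowered = user_input.lower()
--     # Stage 1: collect the rule index of EVERY keyword present (no short-circuit).
--     hits = [idx for kw, idx in _KEYWORD_RULE.items() if kw in lowered]
--     # Stage 2: the highest-priority rule is the minimum index; min = first branch of A's elif chain.
--     if hits:
--         base_prompt += _SUFFIXES[min(hits)]
--     return base_prompt
-- ===== Notes on version B (the rewrite author's own statement) =====
-- stated objective: alternative
-- what changed: Instead of an ordered first-match elif chain over rules, B flattens the rules into a keyword-to-rule-index map, collects the indices of ALL keywords found in the once-lowered input in one exhaustive pass, and then selects the suffix of the minimum index (min index = earliest branch).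
import Mathlib
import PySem

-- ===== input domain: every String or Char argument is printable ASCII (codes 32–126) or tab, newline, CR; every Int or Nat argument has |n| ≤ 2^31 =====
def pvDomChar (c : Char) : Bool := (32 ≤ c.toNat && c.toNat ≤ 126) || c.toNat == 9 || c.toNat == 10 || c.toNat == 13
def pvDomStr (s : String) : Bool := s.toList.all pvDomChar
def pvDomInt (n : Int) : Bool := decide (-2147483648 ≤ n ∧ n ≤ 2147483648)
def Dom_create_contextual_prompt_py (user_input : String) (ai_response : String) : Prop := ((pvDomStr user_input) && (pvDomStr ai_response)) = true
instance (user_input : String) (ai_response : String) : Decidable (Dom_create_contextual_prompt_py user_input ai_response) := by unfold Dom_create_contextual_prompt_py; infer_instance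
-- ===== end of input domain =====

-- B replaces A's ordered elif chain by a flat keyword→rule-index map scanned exhaustively,
-- then picks the suffix of the minimum matched index (alternative decomposition, same cost).

-- ===== PORT A =====
def create_contextual_prompt_py (user_input : String) (ai_response : String) : String :=
  let base_prompt := "Malibu DuGan, photorealistic, 8k, nsfw, ultra thin silk panties"
  if ["tease", "teasing"].any (fun word => PySem.Str.isIn word (PySem.Str.lower user_input)) then
    base_prompt ++ ", teasing pose, seductive expression, playing with silk panties"
  else if ["dance", "lap"].any (fun word => PySem.Str.isIn word (PySem.Str.lower user_input)) then
    base_prompt ++ ", lap dance pose, sensual movement, thigh high stockings"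
  else if ["spiritual", "meditation"].any (fun word => PySem.Str.isIn word (PySem.Str.lower user_input)) then
    base_prompt ++ ", spiritual pose, serene expression, divine lighting"
  else if ["thigh", "legs"].any (fun word => PySem.Str.isIn word (PySem.Str.lower user_input)) then
    base_prompt ++ ", thigh focus, legs showing, silk panty visible"
  else if ["guy", "husband"].any (fun word => PySem.Str.isIn word (PySem.Str.lower user_input)) then
    base_prompt ++ ", loyal expression, showing 'Property Of Guy DuGan II' tattoo"
  else if ["tattoo", "ink"].any (fun word => PySem.Str.isIn word (PySem.Str.lower user_input)) then
    base_prompt ++ ", showing tattoos, lower back tattoo visible"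
  else
    base_prompt

-- ===== PORT B =====
-- flat keyword → rule-index map (dict in insertion order) and the suffix table
def pvKeywordRule : List (String × Nat) :=
  [ ("tease", 0), ("teasing", 0),
    ("dance", 1), ("lap", 1),
    ("spiritual", 2), ("meditation", 2),
    ("thigh", 3), ("legs", 3),
    ("guy", 4), ("husband", 4),
    ("tattoo", 5), ("ink", 5) ]

def pvSuffixes : List String :=
  [ ", teasing pose, seductive expression, playing with silk panties",
    ", lap dance pose, sensual movement, thigh high stockings",
    ", spiritual pose, serene expression, divine lighting",
    ", thigh focus, legs showing, silk panty visible",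
    ", loyal expression, showing 'Property Of Guy DuGan II' tattoo",
    ", showing tattoos, lower back tattoo visible" ]

def create_contextual_prompt_py_alt (user_input : String) (ai_response : String) : String :=
  let base_prompt := "Malibu DuGan, photorealistic, 8k, nsfw, ultra thin silk panties"
  let lowered := PySem.Str.lower user_input
  -- hits = [idx for kw, idx in _KEYWORD_RULE.items() if kw in lowered]
  let hits := pvKeywordRule.filterMap (fun p => if PySem.Str.isIn p.1 lowered then some p.2 else none)
  -- if hits: base_prompt += _SUFFIXES[min(hits)]  (min(hits) is always < 6, so getD never defaults)
  match PySem.List.min? hits (fun i => i) with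
  | some i => base_prompt ++ pvSuffixes.getD i ""
  | none => base_prompt

-- ===== PRECONDITION & SPEC =====
def Spec_create_contextual_prompt_py (user_input : String) (ai_response : String) (out : String) : Prop := out = create_contextual_prompt_py_alt user_input ai_response
instance (user_input : String) (ai_response : String) (out : String) : Decidable (Spec_create_contextual_prompt_py user_input ai_response out) := by unfold Spec_create_contextual_prompt_py; infer_instance

-- ===== CLAIM (what is proved, stated in full; the proofs are below) =====
def Claim_equal_create_contextual_prompt_py : Prop := ∀ (user_input : String) (ai_response : String), Dom_create_contextual_prompt_py user_input ai_response → Spec_create_contextual_prompt_py user_input ai_response (create_contextual_prompt_py user_input ai_response)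

-- ===== LEMMAS AND PROOFS =====
-- foldl min over elements all ≥ k stays at k
theorem pv_foldl_min_eq (k : Nat) (l : List Nat) (h : ∀ x ∈ l, k ≤ x) : l.foldl min k = k := by
  induction l generalizing k with
  | nil => rfl
  | cons x t ih =>
    have hx : min k x = k := min_eq_left (h x (List.mem_cons_self ..))
    simpa [List.foldl, hx] using ih k (fun y hy => h y (List.mem_cons_of_mem _ hy))

-- min of the filterMap of a snd-nondecreasing (flag, index) list is its FIRST flagged index
theorem pv_min_filter (l : List (Bool × Nat)) (h : (l.map Prod.snd).Pairwise (· ≤ ·)) :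
    PySem.List.min? (l.filterMap (fun p => if p.1 then some p.2 else none)) (fun i => i)
      = l.foldr (fun p acc => if p.1 then some p.2 else acc) none := by
  induction l with
  | nil => rfl
  | cons p t ih =>
    simp only [List.map_cons, List.pairwise_cons] at h
    obtain ⟨hle, ht⟩ := h
    simp only [List.filterMap_cons, List.foldr_cons]
    cases hp : p.1
    · simp [ih ht]
    · simp only [ite_true]
      rw [PySem.List.min?_id_cons]
      have : (t.filterMap (fun p => if p.1 then some p.2 else none)).foldl min p.2 = p.2 := by
        refine pv_foldl_min_eq _ _ (fun x hx => ?_)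
        rcases List.mem_filterMap.mp hx with ⟨q, hq, hqx⟩
        by_cases hq1 : q.1 = true
        · rw [if_pos hq1] at hqx
          cases hqx
          exact hle q.2 (List.mem_map_of_mem hq)
        · simp [hq1] at hqx
      simp [this]

-- Both sides are functions of the 12 containment booleans; strings abstracted, min? characterized above.
theorem pv_bool_core (b0 b1 b2 b3 b4 b5 b6 b7 b8 b9 b10 b11 : Bool)
    (base s0 s1 s2 s3 s4 s5 : String) :
    (if b0 || b1 then base ++ s0
     else if b2 || b3 then base ++ s1
     else if b4 || b5 then base ++ s2
     else if b6 || b7 then base ++ s3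
     else if b8 || b9 then base ++ s4
     else if b10 || b11 then base ++ s5
     else base)
    =
    (let hits := (List.zip [b0,b1,b2,b3,b4,b5,b6,b7,b8,b9,b10,b11]
        ([0,0,1,1,2,2,3,3,4,4,5,5] : List Nat)).filterMap
        (fun p => if p.1 then some p.2 else none)
     match PySem.List.min? hits (fun i => i) with
     | some i => base ++ [s0,s1,s2,s3,s4,s5].getD i ""
     | none => base) := by
  have hz : List.zip [b0,b1,b2,b3,b4,b5,b6,b7,b8,b9,b10,b11]
        ([0,0,1,1,2,2,3,3,4,4,5,5] : List Nat)
      = [(b0,0),(b1,0),(b2,1),(b3,1),(b4,2),(b5,2),(b6,3),(b7,3),(b8,4),(b9,4),(b10,5),(b11,5)] := rfl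
  have hp : (List.map Prod.snd [(b0,(0:Nat)),(b1,0),(b2,1),(b3,1),(b4,2),(b5,2),(b6,3),(b7,3),(b8,4),(b9,4),(b10,5),(b11,5)]).Pairwise (· ≤ ·) := by
    have hm : List.map Prod.snd [(b0,(0:Nat)),(b1,0),(b2,1),(b3,1),(b4,2),(b5,2),(b6,3),(b7,3),(b8,4),(b9,4),(b10,5),(b11,5)]
        = [0,0,1,1,2,2,3,3,4,4,5,5] := rfl
    rw [hm]; decide
  simp only [hz]
  rw [pv_min_filter _ hp]
  simp only [List.foldr]
  cases b0 <;> cases b1 <;> cases b2 <;> cases b3 <;> cases b4 <;> cases b5 <;>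
    cases b6 <;> cases b7 <;> cases b8 <;> cases b9 <;> cases b10 <;> cases b11 <;> rfl

-- ===== VERDICT (by name: the statement is the Claim_ definition above) =====
set_option maxRecDepth 4000 in
theorem create_contextual_prompt_py_spec : Claim_equal_create_contextual_prompt_py := by
  intro u a _
  unfold Spec_create_contextual_prompt_py create_contextual_prompt_py create_contextual_prompt_py_alt
  have := pv_bool_core
    (PySem.Str.isIn "tease" (PySem.Str.lower u)) (PySem.Str.isIn "teasing" (PySem.Str.lower u))
    (PySem.Str.isIn "dance" (PySem.Str.lower u)) (PySem.Str.isIn "lap" (PySem.Str.lower u))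
    (PySem.Str.isIn "spiritual" (PySem.Str.lower u)) (PySem.Str.isIn "meditation" (PySem.Str.lower u))
    (PySem.Str.isIn "thigh" (PySem.Str.lower u)) (PySem.Str.isIn "legs" (PySem.Str.lower u))
    (PySem.Str.isIn "guy" (PySem.Str.lower u)) (PySem.Str.isIn "husband" (PySem.Str.lower u))
    (PySem.Str.isIn "tattoo" (PySem.Str.lower u)) (PySem.Str.isIn "ink" (PySem.Str.lower u))
    "Malibu DuGan, photorealistic, 8k, nsfw, ultra thin silk panties"
    ", teasing pose, seductive expression, playing with silk panties"
    ", lap dance pose, sensual movement, thigh high stockings"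
    ", spiritual pose, serene expression, divine lighting"
    ", thigh focus, legs showing, silk panty visible"
    ", loyal expression, showing \'Property Of Guy DuGan II\' tattoo"
    ", showing tattoos, lower back tattoo visible"
  simpa [pvKeywordRule, pvSuffixes, List.any, List.zip, List.zipWith] using this
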